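-- pv_equiv track=rewrite | github.com/gaborlaszlokun/Football-results | bs4_tests.py | format_div
-- ===== SOURCE A (Python) =====
-- def format_div(filename, country):
--     filename = filename.replace("bundesliga","ger")
-- #    new_filename = filename[:3]
--     if filename[:3] != "eng":
--         new_filename = country.lower()
--     else:
--         new_filename = "england"
--     filename_arr = filename[3:].split("-")
--     was_num = False
--     for i in range(len(filename_arr)):
--         if filename_arr[i].isdigit() and len(filename_arr[i]) == 4:
--             new_filename += "-" + filename_arr[i]
--             was_num = True
--         elif was_num is True:
--             new_filename += "-" + filename_arr[i]
--     return new_filename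
-- ===== SOURCE B (Python) =====
-- def format_div(filename, country):
--     filename = filename.replace("bundesliga", "ger")
--     prefix = "england" if filename[:3] == "eng" else country.lower()
--     tokens = filename[3:].split("-")
--     for i, tok in enumerate(tokens):
--         if tok.isdigit() and len(tok) == 4:
--             return prefix + "-" + "-".join(tokens[i:])
--     return prefix
-- ===== Notes on version B (the rewrite author's own statement) =====
-- stated objective: simpler
-- what changed: Replaces the stateful was_num flag loop with a find-first-4-digit-year scan followed by a single bulk join of the token suffix.
import Mathlib
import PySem

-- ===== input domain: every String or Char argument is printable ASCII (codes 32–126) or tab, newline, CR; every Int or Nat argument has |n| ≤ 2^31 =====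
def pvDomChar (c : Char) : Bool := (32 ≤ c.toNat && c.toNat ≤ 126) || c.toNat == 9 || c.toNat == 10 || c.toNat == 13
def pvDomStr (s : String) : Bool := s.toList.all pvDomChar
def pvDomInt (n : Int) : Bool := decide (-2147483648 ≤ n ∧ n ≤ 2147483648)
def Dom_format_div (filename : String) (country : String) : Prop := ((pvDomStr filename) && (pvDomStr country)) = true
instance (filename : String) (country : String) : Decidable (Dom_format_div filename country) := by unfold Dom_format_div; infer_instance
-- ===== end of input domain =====

-- B replaces A's stateful was_num flag loop by locating the first 4-digit token and bulk-joining the suffix (objective: simpler).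

-- ===== PORT A =====
-- stateful pass: (accumulated name, was_num flag)
def pvStepA (st : List Char × Bool) (tok : List Char) : List Char × Bool :=
  if PySem.Chars.strIsdigit tok && PySem.Chars.len tok == 4 then (st.1 ++ '-' :: tok, true)
  else if st.2 then (st.1 ++ '-' :: tok, st.2) else st

def format_div (filename : String) (country : String) : String :=
  let f := PySem.Chars.replace filename.toList "bundesliga".toList "ger".toList
  let newName := if PySem.Chars.slice f none (some 3) ≠ "eng".toList
                 then PySem.Chars.lower country.toList else "england".toList
  let arr := (PySem.Chars.split? (PySem.Chars.slice f (some 3) none) "-".toList).getD []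
  String.ofList (arr.foldl pvStepA (newName, false)).1

-- ===== PORT B =====
-- find the suffix starting at the first 4-digit all-digit token (the enumerate loop + tokens[i:])
def pvFindYear : List (List Char) → Option (List (List Char))
  | [] => none
  | t :: rest =>
    if PySem.Chars.strIsdigit t && PySem.Chars.len t == 4 then some (t :: rest)
    else pvFindYear rest

def format_div_alt (filename : String) (country : String) : String :=
  let f := PySem.Chars.replace filename.toList "bundesliga".toList "ger".toList
  let prefix_ := if PySem.Chars.slice f none (some 3) = "eng".toList
                 then "england".toList else PySem.Chars.lower country.toList
  let arr := (PySem.Chars.split? (PySem.Chars.slice f (some 3) none) "-".toList).getD []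
  match pvFindYear arr with
  | some suf => String.ofList (prefix_ ++ '-' :: PySem.Chars.join "-".toList suf)
  | none => String.ofList prefix_

-- ===== PRECONDITION & SPEC =====
def Spec_format_div (filename : String) (country : String) (out : String) : Prop := out = format_div_alt filename country
instance (filename : String) (country : String) (out : String) : Decidable (Spec_format_div filename country out) := by unfold Spec_format_div; infer_instance

-- ===== CLAIM (what is proved, stated in full; the proofs are below) =====
def Claim_equal_format_div : Prop := ∀ (filename : String) (country : String), Dom_format_div filename country → Spec_format_div filename country (format_div filename country)

-- ===== LEMMAS AND PROOFS =====

-- once was_num is true, every remaining token is appended with a leading '-'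
theorem pvFoldA_true (arr : List (List Char)) (pre : List Char) :
    arr.foldl pvStepA (pre, true) = (pre ++ arr.flatMap (fun t => '-' :: t), true) := by
  induction arr generalizing pre with
  | nil => simp
  | cons t rest ih =>
    simp only [List.foldl_cons, pvStepA]
    split_ifs <;> simp [ih]

-- join "-" on a nonempty token list is tokens glued with '-' separators
theorem pvJoin_cons (t : List Char) (rest : List (List Char)) :
    PySem.Chars.join "-".toList (t :: rest) = t ++ rest.flatMap (fun s => '-' :: s) := by
  induction rest generalizing t with
  | nil => simp [PySem.Chars.join_singleton]
  | cons s rs ih =>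
    rw [PySem.Chars.join_cons_cons, ih]
    simp

-- the flag loop from state false computes prefix + ('-' + join of the suffix at the first year token)
theorem pvFoldA_false (arr : List (List Char)) (pre : List Char) :
    (arr.foldl pvStepA (pre, false)).1 =
      match pvFindYear arr with
      | some suf => pre ++ '-' :: PySem.Chars.join "-".toList suf
      | none => pre := by
  induction arr generalizing pre with
  | nil => simp [pvFindYear]
  | cons t rest ih =>
    simp only [List.foldl_cons, pvStepA, pvFindYear]
    by_cases h : PySem.Chars.strIsdigit t && PySem.Chars.len t == 4
    · simp only [h, if_true, pvFoldA_true, pvJoin_cons]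
      simp
    · simp only [h, if_neg (Bool.false_ne_true), ih]

-- ===== VERDICT (by name: the statement is the Claim_ definition above) =====
theorem format_div_spec : Claim_equal_format_div := by
  intro filename country _
  unfold Spec_format_div format_div format_div_alt
  simp only []
  rw [pvFoldA_false]
  by_cases h : PySem.Chars.slice (PySem.Chars.replace filename.toList "bundesliga".toList "ger".toList) none (some 3) = "eng".toList
  · simp only [h, ite_true, ne_eq, not_true_eq_false, ite_false]
    cases pvFindYear ((PySem.Chars.split? (PySem.Chars.slice (PySem.Chars.replace filename.toList "bundesliga".toList "ger".toList) (some 3) none) "-".toList).getD []) <;> rfl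
  · simp only [h, ite_false, ne_eq, not_false_eq_true, ite_true]
    cases pvFindYear ((PySem.Chars.split? (PySem.Chars.slice (PySem.Chars.replace filename.toList "bundesliga".toList "ger".toList) (some 3) none) "-".toList).getD []) <;> rfl
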